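-- pv_equiv track=rewrite | github.com/grapako/dashboard-untref-laboratorio | Dashboard_encuestas.py | extract_teachers_from_row
-- ===== SOURCE A (Python) =====
-- def extract_teachers_from_row(row_str, official_names, mapping_dict):
--     found = set()
--     row_clean = str(row_str).strip()
--     for t in official_names:
--         if t in row_clean: found.add(t)
--     for variant, official in mapping_dict.items():
--         if variant in row_clean: found.add(official)
--     if not found and row_clean.lower() not in ['nan', 'sin especificar', '', '0']:
--         return [p.strip() for p in row_clean.split(',')]
--     return sorted(list(found))
-- ===== SOURCE B (Python) =====
-- def extract_teachers_from_row(row_str, official_names, mapping_dict):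
--     row_clean = str(row_str).strip()
--     targets = [(t, t) for t in official_names] + list(mapping_dict.items())
--     found = set()
--     buckets = {}
--     for pattern, official in targets:
--         if pattern:
--             buckets.setdefault(pattern[0], []).append((pattern, official))
--         else:
--             found.add(official)  # the empty pattern occurs in every string
--     for j in range(len(row_clean)):
--         for pattern, official in buckets.get(row_clean[j], ()):
--             if row_clean.startswith(pattern, j):
--                 found.add(official)
--     if found:
--         return sorted(found)
--     if row_clean.lower() in ('nan', 'sin especificar', '', '0'):
--         return []
--     return [p.strip() for p in row_clean.split(',')]
-- ===== Notes on version B (the rewrite author's own statement) =====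
-- stated objective: alternative
-- what changed: B replaces A's per-pattern substring scans ('t in row') with a position-major scan: all patterns (official names and mapping variants) are merged into one (pattern, official) list, indexed by first character into buckets, and for each start position of the cleaned row only the bucket of that character is tested with startswith; the matched-officials set, sorting and the comma-split fallback give the same result.
import Mathlib
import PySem

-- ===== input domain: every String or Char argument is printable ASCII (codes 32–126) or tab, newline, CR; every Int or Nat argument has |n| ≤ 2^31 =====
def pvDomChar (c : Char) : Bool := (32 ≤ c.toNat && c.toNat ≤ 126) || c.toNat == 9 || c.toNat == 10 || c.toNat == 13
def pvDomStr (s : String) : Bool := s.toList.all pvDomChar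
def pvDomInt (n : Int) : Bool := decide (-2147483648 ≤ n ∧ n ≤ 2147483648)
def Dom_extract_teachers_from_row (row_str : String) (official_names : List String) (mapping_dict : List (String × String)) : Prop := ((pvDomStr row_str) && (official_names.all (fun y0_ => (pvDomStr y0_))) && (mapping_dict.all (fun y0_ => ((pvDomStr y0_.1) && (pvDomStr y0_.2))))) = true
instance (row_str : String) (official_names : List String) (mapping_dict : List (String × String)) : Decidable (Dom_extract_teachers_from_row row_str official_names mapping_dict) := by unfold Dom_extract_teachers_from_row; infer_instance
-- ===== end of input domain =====

-- B swaps A's pattern-major substring scans for a position-major scan: patterns are merged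
-- into one (pattern, official) list, indexed by first character, and tested with startswith
-- at each start index of the cleaned row (objective: alternative).


-- ===== PORT A =====
def extract_teachers_from_row (row_str : String) (official_names : List String) (mapping_dict : List (String × String)) : List String :=
  let row_clean := PySem.Str.strip row_str
  let found : PySem.Set String :=
    official_names.foldl
      (fun s t => if PySem.Str.isIn t row_clean then PySem.Set.add s t else s)
      PySem.Set.empty
  let found :=
    (PySem.Dict.ofList mapping_dict).items.foldl
      (fun s p => if PySem.Str.isIn p.1 row_clean then PySem.Set.add s p.2 else s)
      found
  if found = [] ∧ ¬ (PySem.Str.lower row_clean ∈ ["nan", "sin especificar", "", "0"]) then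
    -- row_clean.split(','): sep is the non-empty literal ",", so split? is always some (getD totalizes)
    ((PySem.Str.split? row_clean ",").getD []).map PySem.Str.strip
  else
    PySem.List.sorted found (fun x => x) false

-- ===== PORT B =====
def extract_teachers_from_row_alt (row_str : String) (official_names : List String) (mapping_dict : List (String × String)) : List String :=
  let row_clean := PySem.Str.strip row_str
  let targets := official_names.map (fun t => (t, t)) ++ (PySem.Dict.ofList mapping_dict).items
  -- bucket-building loop; 'if pattern:' is the nonempty test (matched on the char list,
  -- exposing pattern[0]); 'buckets.setdefault(c, []).append(x)' is d.insert c (d.getD c [] ++ [x])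
  let fb : PySem.Set String × PySem.Dict Char (List (String × String)) :=
    targets.foldl
      (fun (acc : PySem.Set String × PySem.Dict Char (List (String × String))) (p : String × String) =>
        match p.1.toList with
        | [] => (PySem.Set.add acc.1 p.2, acc.2)
        | c :: _ => (acc.1, acc.2.insert c (acc.2.getD c [] ++ [p])))
      (PySem.Set.empty, PySem.Dict.empty)
  -- 'row_clean.startswith(pattern, j)' is ported as startswith on the slice row_clean[j:],
  -- exact here since 0 ≤ j < len(row_clean); row_clean[j] is pyGet?, always some on this range
  let found : PySem.Set String :=
    (PySem.List.pyRange 0 (PySem.Str.len row_clean : Int) 1).foldl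
      (fun s j =>
        (match PySem.Str.pyGet? row_clean j with
          | some c => fb.2.getD c []
          | none => []).foldl
          (fun s (p : String × String) =>
            if PySem.Str.startswith (PySem.Str.slice row_clean (some j) none) p.1 then
              PySem.Set.add s p.2
            else s)
          s)
      fb.1
  if found ≠ [] then
    PySem.List.sorted found (fun x => x) false
  else if PySem.Str.lower row_clean ∈ ["nan", "sin especificar", "", "0"] then
    []
  else
    -- row_clean.split(','): sep is the non-empty literal ",", so split? is always some (getD totalizes)
    ((PySem.Str.split? row_clean ",").getD []).map PySem.Str.strip

-- ===== PRECONDITION & SPEC =====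
def Spec_extract_teachers_from_row (row_str : String) (official_names : List String) (mapping_dict : List (String × String)) (out : List String) : Prop := out = extract_teachers_from_row_alt row_str official_names mapping_dict
instance (row_str : String) (official_names : List String) (mapping_dict : List (String × String)) (out : List String) : Decidable (Spec_extract_teachers_from_row row_str official_names mapping_dict out) := by unfold Spec_extract_teachers_from_row; infer_instance

-- ===== CLAIM (what is proved, stated in full; the proofs are below) =====
def Claim_equal_extract_teachers_from_row : Prop := ∀ (row_str : String) (official_names : List String) (mapping_dict : List (String × String)), Dom_extract_teachers_from_row row_str official_names mapping_dict → Spec_extract_teachers_from_row row_str official_names mapping_dict (extract_teachers_from_row row_str official_names mapping_dict)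

-- ===== LEMMAS AND PROOFS =====

-- membership in a fold that conditionally adds f a for each a
theorem mem_foldl_add_if {α : Type} (l : List α) (c : α → Bool) (f : α → String)
    (s : List String) (x : String) :
    x ∈ l.foldl (fun s a => if c a then PySem.Set.add s (f a) else s) s ↔
      x ∈ s ∨ ∃ a ∈ l, c a = true ∧ f a = x := by
  induction l generalizing s with
  | nil => simp
  | cons h t ih =>
    simp only [List.foldl_cons]
    by_cases hc : c h = true
    · rw [if_pos hc, ih]
      simp only [PySem.Set.mem_add, List.mem_cons]
      constructor
      · rintro ((hs | rfl) | ⟨a, ha, hca, hfa⟩)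
        · exact .inl hs
        · exact .inr ⟨h, .inl rfl, hc, rfl⟩
        · exact .inr ⟨a, .inr ha, hca, hfa⟩
      · rintro (hs | ⟨a, (rfl | ha), hca, hfa⟩)
        · exact .inl (.inl hs)
        · exact .inl (.inr hfa.symm)
        · exact .inr ⟨a, ha, hca, hfa⟩
    · rw [if_neg hc, ih]
      simp only [List.mem_cons]
      constructor
      · rintro (hs | ⟨a, ha, hca, hfa⟩)
        · exact .inl hs
        · exact .inr ⟨a, .inr ha, hca, hfa⟩
      · rintro (hs | ⟨a, (rfl | ha), hca, hfa⟩)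
        · exact .inl hs
        · exact absurd hca hc
        · exact .inr ⟨a, ha, hca, hfa⟩

theorem nodup_foldl_add_if {α : Type} (l : List α) (c : α → Bool) (f : α → String)
    (s : List String) (hs : s.Nodup) :
    (l.foldl (fun s a => if c a then PySem.Set.add s (f a) else s) s).Nodup := by
  induction l generalizing s with
  | nil => simpa
  | cons h t ih =>
    simp only [List.foldl_cons]
    split
    · exact ih _ (PySem.Set.nodup_add _ _ hs)
    · exact ih _ hs

-- membership in B's outer fold over positions (bucket list depends on the position)
theorem mem_foldl_outer (js : List Int) (tg : Int → List (String × String))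
    (cond : Int → String → Bool) (s : List String) (x : String) :
    x ∈ js.foldl (fun s j =>
        (tg j).foldl (fun s p => if cond j p.1 then PySem.Set.add s p.2 else s) s) s ↔
      x ∈ s ∨ ∃ j ∈ js, ∃ p ∈ tg j, cond j p.1 = true ∧ p.2 = x := by
  induction js generalizing s with
  | nil => simp
  | cons h t ih =>
    simp only [List.foldl_cons, ih, List.mem_cons,
      mem_foldl_add_if (tg h) (fun p => cond h p.1) (fun p => p.2) s x]
    constructor
    · rintro ((hs | ⟨p, hp, hc, hpx⟩) | ⟨j, hj, hrest⟩)
      · exact .inl hs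
      · exact .inr ⟨h, .inl rfl, p, hp, hc, hpx⟩
      · exact .inr ⟨j, .inr hj, hrest⟩
    · rintro (hs | ⟨j, (rfl | hj), hrest⟩)
      · exact .inl (.inl hs)
      · exact .inl (.inr hrest)
      · exact .inr ⟨j, hj, hrest⟩

theorem nodup_foldl_outer (js : List Int) (tg : Int → List (String × String))
    (cond : Int → String → Bool) (s : List String) (hs : s.Nodup) :
    (js.foldl (fun s j =>
        (tg j).foldl (fun s p => if cond j p.1 then PySem.Set.add s p.2 else s) s) s).Nodup := by
  induction js generalizing s with
  | nil => simpa
  | cons h t ih =>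
    exact ih _ (nodup_foldl_add_if (tg h) (fun p => cond h p.1) (fun p => p.2) s hs)

-- the bucket-building fold: first component collects officials of empty patterns
theorem buildFold_fst_mem (targets : List (String × String))
    (acc : PySem.Set String × PySem.Dict Char (List (String × String))) (x : String) :
    x ∈ (targets.foldl
        (fun (acc : PySem.Set String × PySem.Dict Char (List (String × String))) (p : String × String) =>
          match p.1.toList with
          | [] => (PySem.Set.add acc.1 p.2, acc.2)
          | c :: _ => (acc.1, acc.2.insert c (acc.2.getD c [] ++ [p])))
        acc).1 ↔
      x ∈ acc.1 ∨ ∃ p ∈ targets, p.1.toList = [] ∧ p.2 = x := by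
  induction targets generalizing acc with
  | nil => simp
  | cons h t ih =>
    simp only [List.foldl_cons]
    cases hp : h.1.toList with
    | nil =>
      simp only [ih, PySem.Set.mem_add, List.mem_cons]
      constructor
      · rintro ((hs | rfl) | ⟨p, hpt, hpe, hpx⟩)
        · exact .inl hs
        · exact .inr ⟨h, .inl rfl, hp, rfl⟩
        · exact .inr ⟨p, .inr hpt, hpe, hpx⟩
      · rintro (hs | ⟨p, (rfl | hpt), hpe, hpx⟩)
        · exact .inl (.inl hs)
        · exact .inl (.inr hpx.symm)
        · exact .inr ⟨p, hpt, hpe, hpx⟩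
    | cons c cs =>
      simp only [ih, List.mem_cons]
      constructor
      · rintro (hs | ⟨p, hpt, hpe, hpx⟩)
        · exact .inl hs
        · exact .inr ⟨p, .inr hpt, hpe, hpx⟩
      · rintro (hs | ⟨p, (rfl | hpt), hpe, hpx⟩)
        · exact .inl hs
        · exact absurd hpe (by simp [hp])
        · exact .inr ⟨p, hpt, hpe, hpx⟩

theorem buildFold_fst_nodup (targets : List (String × String))
    (acc : PySem.Set String × PySem.Dict Char (List (String × String))) (hs : acc.1.Nodup) :
    (targets.foldl
        (fun (acc : PySem.Set String × PySem.Dict Char (List (String × String))) (p : String × String) =>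
          match p.1.toList with
          | [] => (PySem.Set.add acc.1 p.2, acc.2)
          | c :: _ => (acc.1, acc.2.insert c (acc.2.getD c [] ++ [p])))
        acc).1.Nodup := by
  induction targets generalizing acc with
  | nil => simpa
  | cons h t ih =>
    simp only [List.foldl_cons]
    cases hp : h.1.toList with
    | nil => exact ih _ (PySem.Set.nodup_add _ _ hs)
    | cons c cs => exact ih _ hs

-- the bucket of a character c holds exactly the targets whose pattern starts with c, in order
theorem buildFold_snd_getD (targets : List (String × String))
    (acc : PySem.Set String × PySem.Dict Char (List (String × String))) (c : Char) :
    (targets.foldl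
        (fun (acc : PySem.Set String × PySem.Dict Char (List (String × String))) (p : String × String) =>
          match p.1.toList with
          | [] => (PySem.Set.add acc.1 p.2, acc.2)
          | c :: _ => (acc.1, acc.2.insert c (acc.2.getD c [] ++ [p])))
        acc).2.getD c [] =
      acc.2.getD c [] ++ targets.filter (fun p => p.1.toList.head? == some c) := by
  induction targets generalizing acc with
  | nil => simp
  | cons h t ih =>
    simp only [List.foldl_cons]
    cases hp : h.1.toList with
    | nil =>
      simp only [hp, ih, List.filter_cons]
      simp
    | cons c' cs =>
      by_cases hc : c = c'
      · subst hc
        simp only [hp, ih, List.filter_cons, PySem.Dict.getD_insert]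
        simp
      · simp only [hp, ih, List.filter_cons, PySem.Dict.getD_insert]
        simp [Ne.symm hc, hc]

-- a start position in [0, len) with a startswith hit is exactly substring membership,
-- for a nonempty pattern whose first character matches the row there
theorem scan_hit_iff_isIn (sub s : String) (hne : sub.toList ≠ []) :
    (∃ j ∈ PySem.List.pyRange 0 ((PySem.Str.len s : Int)) 1,
        (∃ c, PySem.Str.pyGet? s j = some c ∧ sub.toList.head? = some c) ∧
        PySem.Str.startswith (PySem.Str.slice s (some j) none) sub = true) ↔
      PySem.Str.isIn sub s = true := by
  constructor
  · rintro ⟨j, hj, -, hsw⟩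
    rw [PySem.List.mem_pyRange_one] at hj
    have h0 : (0:Int) ≤ j := hj.1
    have hsw' : sub.toList <+: s.toList.drop j.toNat := by
      have := (PySem.Chars.startswith_iff (PySem.Str.slice s (some j) none).toList sub.toList).mp
        (by simpa using hsw)
      simpa [PySem.Str.toList_slice, PySem.List.slice_from _ h0] using this
    have : PySem.Chars.isIn sub.toList s.toList = true :=
      (PySem.Chars.exists_prefix_drop_iff_isIn sub.toList s.toList).mp ⟨j.toNat, hsw'⟩
    simpa using this
  · intro hin
    have : PySem.Chars.isIn sub.toList s.toList = true := by simpa using hin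
    obtain ⟨j, hj⟩ := (PySem.Chars.exists_prefix_drop_iff_isIn sub.toList s.toList).mpr this
    obtain ⟨c, cs, hsub⟩ : ∃ c cs, sub.toList = c :: cs := by
      cases h : sub.toList with
      | nil => exact absurd h hne
      | cons a b => exact ⟨a, b, rfl⟩
    -- the drop at j starts with c, so s[j]? = some c and j < length
    have hdropc : ∃ rest, s.toList.drop j = c :: rest := by
      obtain ⟨t, ht⟩ := hj
      exact ⟨cs ++ t, by rw [← ht, hsub]; simp⟩
    obtain ⟨rest, hrest⟩ := hdropc
    have hget : s.toList[j]? = some c := by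
      rw [← List.head?_drop, hrest]; rfl
    have hlt : j < s.toList.length := by
      by_contra hge
      have : s.toList.drop j = [] := List.drop_eq_nil_of_le (by omega)
      simp [this] at hrest
    refine ⟨(j : Int), ?_, ⟨c, ?_, ?_⟩, ?_⟩
    · rw [PySem.List.mem_pyRange_one]
      constructor
      · exact_mod_cast Nat.zero_le j
      · have : (PySem.Str.len s : Int) = (s.toList.length : Int) := by simp [PySem.Str.len_eq]
        omega
    · rw [PySem.Str.pyGet?_natCast]; exact hget
    · rw [hsub]; rfl
    · have hslice : (PySem.Str.slice s (some (j : Int)) none).toList = s.toList.drop j := by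
        simp [PySem.Str.toList_slice, PySem.List.slice_from_natCast]
      rw [← PySem.Chars.startswith_iff] at hj
      simpa [hslice] using hj

-- characterization of A's matched set
theorem mem_foundA (row : String) (official_names : List String) (items : List (String × String)) (x : String) :
    x ∈ items.foldl
          (fun s p => if PySem.Str.isIn p.1 row then PySem.Set.add s p.2 else s)
          (official_names.foldl
            (fun s t => if PySem.Str.isIn t row then PySem.Set.add s t else s)
            PySem.Set.empty) ↔
      (∃ t ∈ official_names, PySem.Str.isIn t row = true ∧ t = x) ∨
      (∃ p ∈ items, PySem.Str.isIn p.1 row = true ∧ p.2 = x) := by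
  rw [mem_foldl_add_if items (fun p => PySem.Str.isIn p.1 row) (fun p => p.2),
    mem_foldl_add_if official_names (fun t => PySem.Str.isIn t row) (fun t => t)]
  simp [PySem.Set.empty]

-- characterization of B's matched set
theorem mem_foundB (row : String) (targets : List (String × String)) (x : String) :
    x ∈ (PySem.List.pyRange 0 ((PySem.Str.len row : Int)) 1).foldl
          (fun s j =>
            (match PySem.Str.pyGet? row j with
              | some c =>
                  (targets.foldl
                    (fun (acc : PySem.Set String × PySem.Dict Char (List (String × String))) (p : String × String) =>
                      match p.1.toList with
                      | [] => (PySem.Set.add acc.1 p.2, acc.2)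
                      | c :: _ => (acc.1, acc.2.insert c (acc.2.getD c [] ++ [p])))
                    (PySem.Set.empty, PySem.Dict.empty)).2.getD c []
              | none => []).foldl
              (fun s (p : String × String) =>
                if PySem.Str.startswith (PySem.Str.slice row (some j) none) p.1 then
                  PySem.Set.add s p.2
                else s)
              s)
          (targets.foldl
            (fun (acc : PySem.Set String × PySem.Dict Char (List (String × String))) (p : String × String) =>
              match p.1.toList with
              | [] => (PySem.Set.add acc.1 p.2, acc.2)
              | c :: _ => (acc.1, acc.2.insert c (acc.2.getD c [] ++ [p])))
            (PySem.Set.empty, PySem.Dict.empty)).1 ↔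
      ∃ p ∈ targets, PySem.Str.isIn p.1 row = true ∧ p.2 = x := by
  rw [mem_foldl_outer (PySem.List.pyRange 0 ((PySem.Str.len row : Int)) 1)
    (fun j =>
      match PySem.Str.pyGet? row j with
      | some c =>
          (targets.foldl
            (fun (acc : PySem.Set String × PySem.Dict Char (List (String × String))) (p : String × String) =>
              match p.1.toList with
              | [] => (PySem.Set.add acc.1 p.2, acc.2)
              | c :: _ => (acc.1, acc.2.insert c (acc.2.getD c [] ++ [p])))
            (PySem.Set.empty, PySem.Dict.empty)).2.getD c []
      | none => [])
    (fun j pat => PySem.Str.startswith (PySem.Str.slice row (some j) none) pat),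
    buildFold_fst_mem]
  simp only [PySem.Set.empty, List.not_mem_nil, false_or]
  constructor
  · rintro (⟨p, hpt, hpe, hpx⟩ | ⟨j, hj, p, hp, hc, hpx⟩)
    · refine ⟨p, hpt, ?_, hpx⟩
      have : PySem.Chars.isIn p.1.toList row.toList = true := by
        rw [hpe]; exact PySem.Chars.isIn_nil row.toList
      simpa using this
    · -- the bucket list at j is nonempty, so pyGet? is some c and p sits in bucket c
      rcases hg : PySem.Str.pyGet? row j with - | c
      · rw [hg] at hp; simp at hp
      · rw [hg] at hp
        dsimp only at hp
        rw [buildFold_snd_getD] at hp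
        simp only [PySem.Dict.getD_empty, List.nil_append, List.mem_filter] at hp
        obtain ⟨hpt, hhead⟩ := hp
        have hne : p.1.toList ≠ [] := by
          intro h; rw [h] at hhead; simp at hhead
        refine ⟨p, hpt, ?_, hpx⟩
        exact (scan_hit_iff_isIn p.1 row hne).mp
          ⟨j, hj, ⟨c, hg, by simpa using hhead⟩, hc⟩
  · rintro ⟨p, hpt, hin, hpx⟩
    cases hpe : p.1.toList with
    | nil => exact .inl ⟨p, hpt, hpe, hpx⟩
    | cons c0 cs0 =>
      obtain ⟨j, hj, ⟨c, hg, hhead⟩, hsw⟩ :=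
        (scan_hit_iff_isIn p.1 row (by simp [hpe])).mpr hin
      refine .inr ⟨j, hj, p, ?_, hsw, hpx⟩
      rw [hg]
      dsimp only
      rw [buildFold_snd_getD]
      simp only [PySem.Dict.getD_empty, List.nil_append, List.mem_filter]
      exact ⟨hpt, by simp [hhead]⟩

-- the two matched sets are permutations of each other
theorem foundA_perm_foundB (row : String) (official_names : List String)
    (mapping_dict : List (String × String)) :
    ((PySem.Dict.ofList mapping_dict).items.foldl
        (fun s p => if PySem.Str.isIn p.1 row then PySem.Set.add s p.2 else s)
        (official_names.foldl
          (fun s t => if PySem.Str.isIn t row then PySem.Set.add s t else s)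
          PySem.Set.empty)).Perm
      ((PySem.List.pyRange 0 ((PySem.Str.len row : Int)) 1).foldl
        (fun s j =>
          (match PySem.Str.pyGet? row j with
            | some c =>
                ((official_names.map (fun t => (t, t)) ++ (PySem.Dict.ofList mapping_dict).items).foldl
                  (fun (acc : PySem.Set String × PySem.Dict Char (List (String × String))) (p : String × String) =>
                    match p.1.toList with
                    | [] => (PySem.Set.add acc.1 p.2, acc.2)
                    | c :: _ => (acc.1, acc.2.insert c (acc.2.getD c [] ++ [p])))
                  (PySem.Set.empty, PySem.Dict.empty)).2.getD c []
            | none => []).foldl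
            (fun s (p : String × String) =>
              if PySem.Str.startswith (PySem.Str.slice row (some j) none) p.1 then
                PySem.Set.add s p.2
              else s)
            s)
        ((official_names.map (fun t => (t, t)) ++ (PySem.Dict.ofList mapping_dict).items).foldl
          (fun (acc : PySem.Set String × PySem.Dict Char (List (String × String))) (p : String × String) =>
            match p.1.toList with
            | [] => (PySem.Set.add acc.1 p.2, acc.2)
            | c :: _ => (acc.1, acc.2.insert c (acc.2.getD c [] ++ [p])))
          (PySem.Set.empty, PySem.Dict.empty)).1) := by
  have hnA : ((PySem.Dict.ofList mapping_dict).items.foldl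
      (fun s p => if PySem.Str.isIn p.1 row then PySem.Set.add s p.2 else s)
      (official_names.foldl
        (fun s t => if PySem.Str.isIn t row then PySem.Set.add s t else s)
        PySem.Set.empty)).Nodup :=
    nodup_foldl_add_if _ _ _ _
      (nodup_foldl_add_if _ _ _ _ (by simp [PySem.Set.empty]))
  have hnB := nodup_foldl_outer (PySem.List.pyRange 0 ((PySem.Str.len row : Int)) 1)
    (fun j =>
      match PySem.Str.pyGet? row j with
      | some c =>
          ((official_names.map (fun t => (t, t)) ++ (PySem.Dict.ofList mapping_dict).items).foldl
            (fun (acc : PySem.Set String × PySem.Dict Char (List (String × String))) (p : String × String) =>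
              match p.1.toList with
              | [] => (PySem.Set.add acc.1 p.2, acc.2)
              | c :: _ => (acc.1, acc.2.insert c (acc.2.getD c [] ++ [p])))
            (PySem.Set.empty, PySem.Dict.empty)).2.getD c []
      | none => [])
    (fun j pat => PySem.Str.startswith (PySem.Str.slice row (some j) none) pat)
    ((official_names.map (fun t => (t, t)) ++ (PySem.Dict.ofList mapping_dict).items).foldl
      (fun (acc : PySem.Set String × PySem.Dict Char (List (String × String))) (p : String × String) =>
        match p.1.toList with
        | [] => (PySem.Set.add acc.1 p.2, acc.2)
        | c :: _ => (acc.1, acc.2.insert c (acc.2.getD c [] ++ [p])))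
      (PySem.Set.empty, PySem.Dict.empty)).1
    (buildFold_fst_nodup _ _ List.nodup_nil)
  rw [List.perm_ext_iff_of_nodup hnA hnB]
  intro x
  rw [mem_foundA, mem_foundB]
  simp only [List.mem_append, List.mem_map]
  constructor
  · rintro (⟨t, ht, hin, rfl⟩ | ⟨p, hp, hin, hx⟩)
    · exact ⟨(t, t), .inl ⟨t, ht, rfl⟩, hin, rfl⟩
    · exact ⟨p, .inr hp, hin, hx⟩
  · rintro ⟨p, (⟨t, ht, rfl⟩ | hp), hin, hx⟩
    · exact .inl ⟨t, ht, hin, hx⟩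
    · exact .inr ⟨p, hp, hin, hx⟩

-- ===== VERDICT (by name: the statement is the Claim_ definition above) =====
theorem extract_teachers_from_row_spec : Claim_equal_extract_teachers_from_row := by
  intro row_str official_names mapping_dict _
  unfold Spec_extract_teachers_from_row extract_teachers_from_row extract_teachers_from_row_alt
  simp only
  have hperm := foundA_perm_foundB (PySem.Str.strip row_str) official_names mapping_dict
  set fA := (PySem.Dict.ofList mapping_dict).items.foldl
      (fun s p => if PySem.Str.isIn p.1 (PySem.Str.strip row_str) then PySem.Set.add s p.2 else s)
      (official_names.foldl
        (fun s t => if PySem.Str.isIn t (PySem.Str.strip row_str) then PySem.Set.add s t else s)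
        PySem.Set.empty) with hfA
  set fB := (PySem.List.pyRange 0 ((PySem.Str.len (PySem.Str.strip row_str) : Int)) 1).foldl
      (fun s j =>
        (match PySem.Str.pyGet? (PySem.Str.strip row_str) j with
          | some c =>
              ((official_names.map (fun t => (t, t)) ++ (PySem.Dict.ofList mapping_dict).items).foldl
                (fun (acc : PySem.Set String × PySem.Dict Char (List (String × String))) (p : String × String) =>
                  match p.1.toList with
                  | [] => (PySem.Set.add acc.1 p.2, acc.2)
                  | c :: _ => (acc.1, acc.2.insert c (acc.2.getD c [] ++ [p])))
                (PySem.Set.empty, PySem.Dict.empty)).2.getD c []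
          | none => []).foldl
          (fun s (p : String × String) =>
            if PySem.Str.startswith (PySem.Str.slice (PySem.Str.strip row_str) (some j) none) p.1 then
              PySem.Set.add s p.2
            else s)
          s)
      ((official_names.map (fun t => (t, t)) ++ (PySem.Dict.ofList mapping_dict).items).foldl
        (fun (acc : PySem.Set String × PySem.Dict Char (List (String × String))) (p : String × String) =>
          match p.1.toList with
          | [] => (PySem.Set.add acc.1 p.2, acc.2)
          | c :: _ => (acc.1, acc.2.insert c (acc.2.getD c [] ++ [p])))
        (PySem.Set.empty, PySem.Dict.empty)).1 with hfB
  have hnil : fA = [] ↔ fB = [] := by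
    rw [← List.length_eq_zero_iff, ← List.length_eq_zero_iff, hperm.length_eq]
  have hsorted : PySem.List.sorted fA (fun x => x) false = PySem.List.sorted fB (fun x => x) false :=
    PySem.List.sorted_eq_sorted_of_perm fA fB (fun x => x) (fun a b h => h) hperm
  by_cases hA : fA = []
  · have hB : fB = [] := hnil.mp hA
    rw [hA, hB]
    by_cases hmem : PySem.Str.lower (PySem.Str.strip row_str) ∈ (["nan", "sin especificar", "", "0"] : List String)
    · rw [if_neg (fun h => h.2 hmem), if_neg (fun h => h rfl), if_pos hmem]
      exact (PySem.List.sorted_eq_nil_iff _ _ _).mpr rfl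
    · rw [if_pos ⟨rfl, hmem⟩, if_neg (fun h => h rfl), if_neg hmem]
  · have hB : fB ≠ [] := fun h => hA (hnil.mpr h)
    rw [if_neg (fun h => hA h.1), if_pos hB]
    exact hsorted
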